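-- pv_equiv track=rewrite | github.com/danielmast/advent-of-code-2025 | day2/solution.py | _is_valid_id
-- ===== SOURCE A (Python) =====
-- def _is_valid_id(product_id: int, use_divisor_range: bool) -> bool:
--     divisor_range = range(2, len(str(product_id)) + 1) if use_divisor_range else [2]
--
--     for divisor in divisor_range:
--         if len(str(product_id)) % divisor != 0:
--             continue
--
--         part_len = len(str(product_id)) // divisor
--         part = str(product_id)[:part_len]
--
--         if str(product_id).count(part) == divisor:
--             return False
--
--     return True
-- ===== SOURCE B (Python) =====
-- def _is_valid_id(product_id: int, use_divisor_range: bool) -> bool: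
--     s = str(product_id)
--     if use_divisor_range:
--         # s is a repetition of a shorter block iff s occurs in s+s before index len(s)
--         return (s + s).find(s, 1) == len(s)
--     return not (len(s) % 2 == 0 and s[:len(s) // 2] * 2 == s)
-- ===== Notes on version B (the rewrite author's own statement) =====
-- stated objective: idiomatic
-- what changed: Replaces the divisor loop with count-based tiling checks by the closed-form string-doubling periodicity test (s+s).find(s,1)==len(s) for the range mode, and a single half-split comparison for the other mode.
import Mathlib
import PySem

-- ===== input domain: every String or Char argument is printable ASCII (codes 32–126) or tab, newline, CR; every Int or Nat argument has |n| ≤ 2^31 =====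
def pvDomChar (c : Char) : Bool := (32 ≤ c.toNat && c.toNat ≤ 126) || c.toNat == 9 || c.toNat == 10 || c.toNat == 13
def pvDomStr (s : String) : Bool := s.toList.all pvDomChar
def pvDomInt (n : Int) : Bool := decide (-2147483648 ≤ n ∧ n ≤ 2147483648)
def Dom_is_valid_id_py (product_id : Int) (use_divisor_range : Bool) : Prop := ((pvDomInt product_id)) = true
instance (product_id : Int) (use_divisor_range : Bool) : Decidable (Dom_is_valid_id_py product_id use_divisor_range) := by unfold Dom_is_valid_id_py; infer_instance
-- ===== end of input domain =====

-- B replaces A's divisor loop (a count-based tiling test per divisor) by the closed-form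
-- string-doubling periodicity test (s+s).find(s,1)==len(s); same return value everywhere.


-- ===== PORT A =====
-- A's `for divisor in divisor_range` loop with its early `return False`;
-- s is str(product_id) as a character list (PySem.Int.toChars n = (PySem.Int.toStr n).toList).
def pvALoop (s : List Char) : List Int → Bool
  | [] => true
  | divisor :: rest =>
    if PySem.Int.mod (PySem.Chars.len s) divisor ≠ 0 then pvALoop s rest
    else
      let part_len := PySem.Int.floordiv (PySem.Chars.len s) divisor
      let part := PySem.Chars.slice s none (some part_len)
      if (PySem.Chars.count s part : Int) = divisor then false
      else pvALoop s rest

def is_valid_id_py (product_id : Int) (use_divisor_range : Bool) : Bool :=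
  let s := PySem.Int.toChars product_id
  let divisor_range : List Int :=
    if use_divisor_range then PySem.List.pyRange 2 (PySem.Chars.len s + 1) 1 else [2]
  pvALoop s divisor_range

-- ===== PORT B =====
def is_valid_id_py_alt (product_id : Int) (use_divisor_range : Bool) : Bool :=
  let s := PySem.Int.toChars product_id
  if use_divisor_range then
    -- (s + s).find(s, 1) == len(s)
    PySem.Chars.findFrom (s ++ s) s 1 none == PySem.Chars.len s
  else
    -- not (len(s) % 2 == 0 and s[:len(s) // 2] * 2 == s)
    let h := PySem.Chars.slice s none (some (PySem.Int.floordiv (PySem.Chars.len s) 2))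
    !(PySem.Int.mod (PySem.Chars.len s) 2 == 0 && (h ++ h) == s)

-- ===== PRECONDITION & SPEC =====
def Spec_is_valid_id_py (product_id : Int) (use_divisor_range : Bool) (out : Bool) : Prop := out = is_valid_id_py_alt product_id use_divisor_range
instance (product_id : Int) (use_divisor_range : Bool) (out : Bool) : Decidable (Spec_is_valid_id_py product_id use_divisor_range out) := by unfold Spec_is_valid_id_py; infer_instance

-- ===== CLAIM (what is proved, stated in full; the proofs are below) =====
def Claim_equal_is_valid_id_py : Prop := ∀ (product_id : Int) (use_divisor_range : Bool), Dom_is_valid_id_py product_id use_divisor_range → Spec_is_valid_id_py product_id use_divisor_range (is_valid_id_py product_id use_divisor_range)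

-- ===== LEMMAS AND PROOFS =====

def pvRep (p : List Char) : Nat → List Char
  | 0 => []
  | d + 1 => p ++ pvRep p d
theorem pvRep_length (p : List Char) (d : Nat) : (pvRep p d).length = d * p.length := by
  induction d with
  | zero => simp [pvRep]
  | succ d ih => simp [pvRep, ih]; ring

theorem pvGo_rep (p : List Char) (hp : p ≠ []) : ∀ (d fuel acc : Nat),
    (pvRep p d).length ≤ fuel → PySem.Chars.count.go p fuel (pvRep p d) acc = acc + d := by
  intro d
  induction d with
  | zero =>
    intro fuel acc _
    cases fuel with
    | zero => rw [show pvRep p 0 = [] from rfl, PySem.Chars.count.go]; omega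
    | succ f =>
      rw [show pvRep p 0 = [] from rfl, PySem.Chars.count.go] <;> omega
  | succ d ih =>
    intro fuel acc hf
    obtain ⟨c, p', rfl⟩ : ∃ c p', p = c :: p' := by
      cases p with | nil => exact absurd rfl hp | cons c p' => exact ⟨c, p', rfl⟩
    have hsplit : (pvRep (c :: p') (d + 1)).length = p'.length + 1 + (pvRep (c :: p') d).length := by
      rw [show pvRep (c :: p') (d + 1) = (c :: p') ++ pvRep (c :: p') d from rfl, List.length_append]
      simp
    cases fuel with
    | zero => omega
    | succ f =>
      have hpre : (c :: p').isPrefixOf ((c :: p') ++ pvRep (c :: p') d) = true := by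
        simp [List.isPrefixOf_iff_prefix]
      rw [show pvRep (c :: p') (d + 1) = (c :: p') ++ pvRep (c :: p') d from rfl]
      rw [List.cons_append, PySem.Chars.count.go]
      rw [← List.cons_append, if_pos hpre, List.drop_left]
      rw [ih f (acc + 1) (by omega)]
      omega

theorem pvGo_mono (p : List Char) : ∀ (fuel : Nat) (l : List Char) (acc : Nat),
    acc ≤ PySem.Chars.count.go p fuel l acc := by
  intro fuel
  induction fuel with
  | zero => intro l acc; rw [PySem.Chars.count.go]
  | succ f ih =>
    intro l acc
    cases l with
    | nil =>
      rw [PySem.Chars.count.go]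
      · omega
    | cons h t =>
      rw [PySem.Chars.count.go]
      split
      · exact le_trans (by omega) (ih _ _)
      · exact ih _ _

theorem pvGo_bound (p : List Char) (hp : p ≠ []) : ∀ (fuel : Nat) (l : List Char) (acc k : Nat),
    l.length ≤ fuel → PySem.Chars.count.go p fuel l acc = acc + k →
    k * p.length ≤ l.length ∧ (k * p.length = l.length → l = pvRep p k) := by
  intro fuel
  induction fuel with
  | zero =>
    intro l acc k hl hg
    have hl0 : l = [] := by cases l with | nil => rfl | cons a b => simp at hl
    subst hl0
    rw [PySem.Chars.count.go] at hg
    have hk : k = 0 := by omega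
    subst hk
    exact ⟨by simp, fun _ => rfl⟩
  | succ f ih =>
    intro l acc k hl hg
    cases l with
    | nil =>
      rw [PySem.Chars.count.go] at hg
      · have hk : k = 0 := by omega
        subst hk
        exact ⟨by simp, fun _ => rfl⟩
      · omega
    | cons c t =>
      have hplen : 1 ≤ p.length := by
        cases p with | nil => exact absurd rfl hp | cons a b => simp
      rw [PySem.Chars.count.go] at hg
      by_cases hpre : p.isPrefixOf (c :: t) = true
      · rw [if_pos hpre] at hg
        obtain ⟨l', hl'⟩ := List.isPrefixOf_iff_prefix.mp hpre
        have hdrop : List.drop p.length (c :: t) = l' := by rw [← hl', List.drop_left]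
        rw [hdrop] at hg
        have hmono := pvGo_mono p f l' (acc + 1)
        have hk1 : 1 ≤ k := by omega
        have hlen : (c :: t).length = p.length + l'.length := by rw [← hl', List.length_append]
        have hg' : PySem.Chars.count.go p f l' (acc + 1) = (acc + 1) + (k - 1) := by omega
        obtain ⟨hle, heq⟩ := ih l' (acc + 1) (k - 1) (by simp at hl hlen; omega) hg'
        have hkk : k * p.length = (k - 1) * p.length + p.length := by
          have h1 : k = (k - 1) + 1 := by omega
          calc k * p.length = ((k - 1) + 1) * p.length := by rw [← h1]
            _ = (k - 1) * p.length + p.length := by ring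
        constructor
        · omega
        · intro he
          have : (k - 1) * p.length = l'.length := by omega
          have hrep := heq this
          have h1 : k = (k - 1) + 1 := by omega
          rw [← hl', hrep, h1]
          rfl
      · rw [if_neg hpre] at hg
        obtain ⟨hle, _⟩ := ih t acc k (by simp at hl; omega) hg
        constructor
        · simp; omega
        · intro he
          simp at he
          omega

theorem pvRep_add (p : List Char) (a b : Nat) : pvRep p (a + b) = pvRep p a ++ pvRep p b := by
  induction a with
  | zero => simp [pvRep]
  | succ a ih =>
      rw [show a + 1 + b = (a + b) + 1 by omega]
      simp [pvRep, ih, List.append_assoc]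

theorem pvRep_nil (d : Nat) : pvRep [] d = [] := by
  induction d with
  | zero => rfl
  | succ d ih => simp [pvRep, ih]

theorem pvCount_rep (p : List Char) (hp : p ≠ []) (d : Nat) :
    PySem.Chars.count (pvRep p d) p = d := by
  have hpe : p.isEmpty = false := by cases p with | nil => exact absurd rfl hp | cons a b => rfl
  rw [PySem.Chars.count, hpe]
  simp only [Bool.false_eq_true, if_false]
  simpa using pvGo_rep p hp d (pvRep p d).length 0 (le_refl _)

theorem pvCount_eq_iff (s p : List Char) (hp : p ≠ []) (d : Nat)
    (hl : s.length = d * p.length) :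
    PySem.Chars.count s p = d ↔ s = pvRep p d := by
  constructor
  · intro hc
    have hpe : p.isEmpty = false := by cases p with | nil => exact absurd rfl hp | cons a b => rfl
    rw [PySem.Chars.count, hpe] at hc
    simp only [Bool.false_eq_true, if_false] at hc
    have := pvGo_bound p hp s.length s 0 d (le_refl _) (by omega)
    exact this.2 hl.symm
  · intro hs
    rw [hs, ← hl] at *
    rw [hs]
    exact pvCount_rep p hp d

theorem pvComm (u v : List Char) (h : u ++ v = v ++ u) :
    ∃ w a b, u = pvRep w a ∧ v = pvRep w b := by
  by_cases hu : u = []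
  · exact ⟨v, 0, 1, by simp [hu, pvRep], by simp [pvRep]⟩
  by_cases hv : v = []
  · exact ⟨u, 1, 0, by simp [pvRep], by simp [hv, pvRep]⟩
  have hul : 1 ≤ u.length := by cases u with | nil => exact absurd rfl hu | cons a b => simp
  have hvl : 1 ≤ v.length := by cases v with | nil => exact absurd rfl hv | cons a b => simp
  rcases le_or_gt u.length v.length with hle | hlt
  · -- u is a prefix of v
    have htake : u = v.take u.length := by
      have h1 : (u ++ v).take u.length = u := List.take_left
      have h2 : (v ++ u).take u.length = v.take u.length := List.take_append_of_le_length hle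
      rw [h] at h1
      rw [h2] at h1
      exact h1.symm
    have hv' : v = u ++ v.drop u.length := by
      conv_lhs => rw [← List.take_append_drop u.length v, ← htake]
    set v' := v.drop u.length with hv'def
    have hcomm : u ++ v' = v' ++ u := by
      have h2 := h
      rw [hv'] at h2
      rw [List.append_assoc] at h2
      exact List.append_cancel_left h2
    obtain ⟨w, a, b, hwa, hwb⟩ := pvComm u v' hcomm
    exact ⟨w, a, a + b, hwa, by rw [hv', hwa, hwb, ← pvRep_add]⟩
  · -- v is a prefix of u
    have htake : v = u.take v.length := by
      have h1 : (v ++ u).take v.length = v := List.take_left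
      have h2 : (u ++ v).take v.length = u.take v.length := List.take_append_of_le_length (le_of_lt hlt)
      rw [← h] at h1
      rw [h2] at h1
      exact h1.symm
    have hu' : u = v ++ u.drop v.length := by
      conv_lhs => rw [← List.take_append_drop v.length u, ← htake]
    set u' := u.drop v.length with hu'def
    have hcomm : v ++ u' = u' ++ v := by
      have h2 := h.symm
      rw [hu'] at h2
      rw [List.append_assoc] at h2
      exact List.append_cancel_left h2
    obtain ⟨w, a, b, hwa, hwb⟩ := pvComm v u' hcomm
    exact ⟨w, a + b, a, by rw [hu', hwa, hwb, ← pvRep_add], hwa⟩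
termination_by u.length + v.length
decreasing_by
  · have h1 : (List.drop u.length v).length = v.length - u.length := List.length_drop
    omega
  · have h1 : (List.drop v.length u).length = u.length - v.length := List.length_drop
    omega

theorem pvPeriod_iff (s : List Char) (hs : s ≠ []) :
    (∃ k : Nat, 1 ≤ k ∧ k < s.length ∧ s <+: (s.drop k ++ s)) ↔
    (∃ d : Nat, 2 ≤ d ∧ d ≤ s.length ∧ s.length % d = 0 ∧ s = pvRep (s.take (s.length / d)) d) := by
  have hsl : 1 ≤ s.length := by cases s with | nil => exact absurd rfl hs | cons a b => simp
  constructor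
  · rintro ⟨k, hk1, hk2, hpre⟩
    have hlen_drop : (s.drop k).length = s.length - k := List.length_drop
    obtain ⟨r, hr⟩ := hpre
    have heq : s = s.drop k ++ s.take k := by
      have h1 := congrArg (List.take s.length) hr
      rw [List.take_left, List.take_append] at h1
      rw [List.take_of_length_le (by omega)] at h1
      rw [hlen_drop, show s.length - (s.length - k) = k by omega] at h1
      exact h1
    have hcomm : s.take k ++ s.drop k = s.drop k ++ s.take k := by
      rw [List.take_append_drop]
      exact heq
    obtain ⟨w, a, b, hwa, hwb⟩ := pvComm (s.take k) (s.drop k) hcomm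
    have hs_rep : s = pvRep w (a + b) := by
      rw [← List.take_append_drop k s, hwa, hwb, pvRep_add]
    have hwl : 1 ≤ w.length := by
      rcases Nat.eq_zero_or_pos w.length with h0 | h1
      · exfalso
        have : w = [] := List.length_eq_zero_iff.mp h0
        rw [this, pvRep_nil] at hs_rep
        exact hs hs_rep
      · exact h1
    have hta : (s.take k).length = k := by
      rw [List.length_take]
      omega
    have ha1 : 1 ≤ a := by
      rcases Nat.eq_zero_or_pos a with h0 | h1
      · exfalso
        rw [h0] at hwa
        rw [show pvRep w 0 = [] from rfl] at hwa
        rw [hwa] at hta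
        simp at hta
        omega
      · exact h1
    have htb : (s.drop k).length = s.length - k := List.length_drop
    have hb1 : 1 ≤ b := by
      rcases Nat.eq_zero_or_pos b with h0 | h1
      · exfalso
        rw [h0] at hwb
        rw [show pvRep w 0 = [] from rfl] at hwb
        rw [hwb] at htb
        simp at htb
        omega
      · exact h1
    refine ⟨a + b, by omega, ?_, ?_, ?_⟩
    · have := pvRep_length w (a + b)
      rw [← hs_rep] at this
      nlinarith
    · have := pvRep_length w (a + b)
      rw [← hs_rep] at this
      rw [this]
      exact Nat.mul_mod_right (a + b) w.length
    · have hlen : s.length = (a + b) * w.length := by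
        have := pvRep_length w (a + b)
        rw [← hs_rep] at this
        exact this
      have hdiv : s.length / (a + b) = w.length := by
        rw [hlen]
        exact Nat.mul_div_cancel_left w.length (by omega)
      have htakew : s.take (s.length / (a + b)) = w := by
        rw [hdiv]
        conv_lhs => rw [hs_rep, show a + b = (a + b - 1) + 1 by omega]
        rw [show pvRep w (a + b - 1 + 1) = w ++ pvRep w (a + b - 1) from rfl]
        exact List.take_left
      rw [htakew]
      exact hs_rep
  · rintro ⟨d, hd2, hdn, hmod, hrep⟩
    have hplen : (s.take (s.length / d)).length = s.length / d := by
      rw [List.length_take]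
      have : s.length / d ≤ s.length := Nat.div_le_self _ _
      omega
    have hlen : s.length = d * (s.take (s.length / d)).length := by
      conv_lhs => rw [hrep]
      exact pvRep_length _ d
    set p := s.take (s.length / d) with hpdef
    have hk1 : 1 ≤ p.length := by nlinarith
    have hk2 : p.length < s.length := by nlinarith
    refine ⟨p.length, hk1, hk2, ?_⟩
    have hdrop : s.drop p.length = pvRep p (d - 1) := by
      conv_lhs => rw [hrep, show d = (d - 1) + 1 by omega]
      rw [show pvRep p (d - 1 + 1) = p ++ pvRep p (d - 1) from rfl]
      exact List.drop_left
    rw [hdrop]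
    conv_rhs => rw [hrep]
    rw [show pvRep p (d - 1) ++ pvRep p d = pvRep p ((d - 1) + d) by rw [pvRep_add]]
    rw [show (d - 1) + d = d + (d - 1) by omega, pvRep_add]
    conv_lhs => rw [hrep]
    exact ⟨pvRep p (d - 1), rfl⟩

theorem pvModZ (a : ℤ) {b : ℤ} (h : 0 ≤ b) : PySem.Int.mod a b = a % b := by
  rw [PySem.Int.mod, Int.fmod_eq_emod]
  simp [h]

theorem pvDivZ (a : ℤ) {b : ℤ} (h : 0 ≤ b) : PySem.Int.floordiv a b = a / b := by
  rw [PySem.Int.floordiv, Int.fdiv_eq_ediv]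
  simp [h]

theorem pvALoop_true_iff (s : List Char) (l : List Int) :
    pvALoop s l = true ↔ ∀ d ∈ l, ¬(PySem.Int.mod (PySem.Chars.len s) d = 0 ∧
      ((PySem.Chars.count s (PySem.Chars.slice s none (some (PySem.Int.floordiv (PySem.Chars.len s) d))) : Int) = d)) := by
  induction l with
  | nil => simp [pvALoop]
  | cons d rest ih =>
    simp only [pvALoop]
    by_cases h1 : PySem.Int.mod (PySem.Chars.len s) d ≠ 0
    · rw [if_pos h1, ih]
      simp only [List.mem_cons]
      constructor
      · rintro h x (rfl | hx)
        · rintro ⟨hm, _⟩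
          exact h1 hm
        · exact h x hx
      · intro h x hx
        exact h x (Or.inr hx)
    · rw [if_neg h1]
      rw [not_not] at h1
      by_cases h2 : ((PySem.Chars.count s (PySem.Chars.slice s none (some (PySem.Int.floordiv (PySem.Chars.len s) d))) : Int)) = d
      · simp only [h2, if_pos rfl]
        constructor
        · intro h
          exact absurd h (by simp)
        · intro h
          exact absurd (by exact ⟨h1, h2⟩) (h d (by simp))
      · rw [if_neg h2, ih]
        simp only [List.mem_cons]
        constructor
        · rintro h x (rfl | hx)
          · rintro ⟨_, hc⟩
            exact h2 hc
          · exact h x hx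
        · intro h x hx
          exact h x (Or.inr hx)

theorem pvCore_len (f : Nat) : ∀ (n : Nat) (acc : List Char),
    acc.length ≤ (Nat.toDigitsCore 10 f n acc).length := by
  induction f with
  | zero => intro n acc; rw [Nat.toDigitsCore]
  | succ f ih =>
    intro n acc
    rw [Nat.toDigitsCore]
    split
    · simp
    · exact le_trans (by simp) (ih _ _)

theorem pvToChars_ne_nil (n : Int) : PySem.Int.toChars n ≠ [] := by
  have hdig : ∀ m : Nat, Nat.toDigits 10 m ≠ [] := by
    intro m
    rw [Nat.toDigits, Nat.toDigitsCore]
    split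
    · simp
    · intro hnil
      have := pvCore_len m (m / 10) [(m % 10).digitChar]
      rw [hnil] at this
      simp at this
  rw [PySem.Int.toChars]
  split
  · simp
  · exact hdig _

theorem pvHit_iff (s : List Char) (hs : s ≠ []) (dn : Nat) (h2 : 2 ≤ dn) :
    (PySem.Int.mod (PySem.Chars.len s) (dn : ℤ) = 0 ∧
      ((PySem.Chars.count s (PySem.Chars.slice s none (some (PySem.Int.floordiv (PySem.Chars.len s) (dn : ℤ)))) : ℤ) = (dn : ℤ)))
    ↔ (s.length % dn = 0 ∧ s = pvRep (s.take (s.length / dn)) dn) := by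
  have hsl : 1 ≤ s.length := by cases s with | nil => exact absurd rfl hs | cons a b => simp
  have hd0 : (0 : ℤ) ≤ (dn : ℤ) := by positivity
  rw [PySem.Chars.len_eq, pvModZ _ hd0, pvDivZ _ hd0]
  have hmod : ((s.length : ℤ) % (dn : ℤ) = 0) ↔ s.length % dn = 0 := by
    constructor
    · intro h; exact_mod_cast h
    · intro h; exact_mod_cast (congrArg (fun x : ℕ => (x : ℤ)) h)
  have hdiveq : ((s.length : ℤ) / (dn : ℤ)) = ((s.length / dn : ℕ) : ℤ) := by
    exact_mod_cast (Int.natCast_div s.length dn).symm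
  rw [hdiveq, PySem.Chars.slice_eq_listSlice, PySem.List.slice_to s (by positivity), Int.toNat_natCast, hmod]
  refine and_congr_right fun hm => ?_
  have hdvd : dn ∣ s.length := Nat.dvd_of_mod_eq_zero hm
  have hdle : dn ≤ s.length := Nat.le_of_dvd (by omega) hdvd
  have hq1 : 1 ≤ s.length / dn := Nat.div_pos hdle (by omega)
  have hplen : (s.take (s.length / dn)).length = s.length / dn := by
    rw [List.length_take]
    have := Nat.div_le_self s.length dn
    omega
  have hpne : s.take (s.length / dn) ≠ [] := by
    intro h
    rw [h] at hplen
    simp at hplen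
    omega
  have hl : s.length = dn * (s.take (s.length / dn)).length := by
    rw [hplen]
    exact (Nat.mul_div_cancel' hdvd).symm
  rw [show ((PySem.Chars.count s (s.take (s.length / dn)) : ℕ) : ℤ) = (dn : ℤ) ↔
      PySem.Chars.count s (s.take (s.length / dn)) = dn from Nat.cast_inj]
  exact pvCount_eq_iff s _ hpne dn hl

theorem pvA_true_iff (s : List Char) (hs : s ≠ []) :
    pvALoop s (PySem.List.pyRange 2 (PySem.Chars.len s + 1) 1) = true ↔
    ¬ (∃ d : Nat, 2 ≤ d ∧ d ≤ s.length ∧ s.length % d = 0 ∧ s = pvRep (s.take (s.length / d)) d) := by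
  rw [pvALoop_true_iff]
  constructor
  · rintro h ⟨d, hd2, hdn, hmod, hrep⟩
    have hmem : (d : ℤ) ∈ PySem.List.pyRange 2 (PySem.Chars.len s + 1) 1 := by
      rw [PySem.List.mem_pyRange_iff_of_pos one_pos]
      refine ⟨by exact_mod_cast hd2, ?_, one_dvd _⟩
      rw [PySem.Chars.len_eq]
      push_cast
      omega
    exact h _ hmem ((pvHit_iff s hs d hd2).mpr ⟨hmod, hrep⟩)
  · intro h d hmem
    rw [PySem.List.mem_pyRange_iff_of_pos one_pos] at hmem
    obtain ⟨hd2, hdlt, -⟩ := hmem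
    rw [PySem.Chars.len_eq] at hdlt
    have hd0 : 0 ≤ d := by omega
    have hdeq : d = (d.toNat : ℤ) := (Int.toNat_of_nonneg hd0).symm
    intro hhit
    rw [hdeq] at hhit
    refine h ⟨d.toNat, by omega, by omega, (pvHit_iff s hs d.toNat (by omega)).mp hhit⟩

theorem pvB_true_iff (s : List Char) (hs : s ≠ []) :
    ((PySem.Chars.findFrom (s ++ s) s 1 none == PySem.Chars.len s) = true) ↔
    ¬ (∃ k : Nat, 1 ≤ k ∧ k < s.length ∧ s <+: (s.drop k ++ s)) := by
  have hsl : 1 ≤ s.length := by cases s with | nil => exact absurd rfl hs | cons a b => simp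
  have hff := PySem.Chars.findFrom_natCast (s ++ s) s 1 (by simp; omega)
  rw [show ((1 : ℕ) : ℤ) = (1 : ℤ) by norm_num] at hff
  have hdrop1 : (s ++ s).drop 1 = s.drop 1 ++ s := by
    rw [List.drop_append, show 1 - s.length = 0 by omega, List.drop_zero]
  rw [hdrop1] at hff
  set t := s.drop 1 ++ s with htdef
  have hdropk : ∀ k : Nat, 1 ≤ k → k ≤ s.length - 1 → t.drop (k - 1) = s.drop k ++ s := by
    intro k hk1 hk2
    rw [htdef, List.drop_append, List.drop_drop, List.length_drop,
      show 1 + (k - 1) = k by omega, show k - 1 - (s.length - 1) = 0 by omega, List.drop_zero]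
  have hocc : s <+: t.drop (s.length - 1) := by
    have h1 : t.drop (s.length - 1) = s := by
      rw [htdef, List.drop_append, List.length_drop]
      rw [List.drop_eq_nil_of_le (by rw [List.length_drop])]
      rw [show s.length - 1 - (s.length - 1) = 0 by omega, List.drop_zero, List.nil_append]
    rw [h1]
  have hinf : s <:+: t := by
    obtain ⟨r, hr⟩ := hocc
    exact ⟨t.take (s.length - 1), r, by rw [List.append_assoc, hr, List.take_append_drop]⟩
  have hfne : PySem.Chars.find t s ≠ -1 := (PySem.Chars.find_ne_neg_one_iff t s).mpr hinf
  have hf0 : 0 ≤ PySem.Chars.find t s := (PySem.Chars.find_nonneg_iff t s).mpr hinf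
  obtain ⟨hpref, hmin⟩ := PySem.Chars.find_spec hf0
  have hfle : (PySem.Chars.find t s).toNat ≤ s.length - 1 := by
    by_contra hcon
    exact hmin (s.length - 1) (by omega) hocc
  rw [hff, if_neg hfne, PySem.Chars.len_eq]
  rw [beq_iff_eq]
  have hfcast : PySem.Chars.find t s = ((PySem.Chars.find t s).toNat : ℤ) := (Int.toNat_of_nonneg hf0).symm
  constructor
  · intro heq
    rintro ⟨k, hk1, hk2, hp⟩
    have hkle : k - 1 < (PySem.Chars.find t s).toNat := by omega
    exact hmin (k - 1) hkle (by rw [hdropk k hk1 (by omega)]; exact hp)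
  · intro hnp
    have : (PySem.Chars.find t s).toNat = s.length - 1 := by
      by_contra hcon
      have hlt : (PySem.Chars.find t s).toNat < s.length - 1 := by omega
      refine hnp ⟨(PySem.Chars.find t s).toNat + 1, by omega, by omega, ?_⟩
      rw [← hdropk ((PySem.Chars.find t s).toNat + 1) (by omega) (by omega)]
      simpa using hpref
    omega

theorem pvFalse_iff (s : List Char) (hs : s ≠ []) :
    (PySem.Int.mod (PySem.Chars.len s) 2 = 0 ∧
     PySem.Chars.slice s none (some (PySem.Int.floordiv (PySem.Chars.len s) 2)) ++
       PySem.Chars.slice s none (some (PySem.Int.floordiv (PySem.Chars.len s) 2)) = s)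
    ↔ (s.length % 2 = 0 ∧ s = pvRep (s.take (s.length / 2)) 2) := by
  have hd0 : (0 : ℤ) ≤ 2 := by norm_num
  rw [PySem.Chars.len_eq, pvModZ _ hd0, pvDivZ _ hd0]
  have hdiveq : ((s.length : ℤ) / 2) = ((s.length / 2 : ℕ) : ℤ) := by
    exact_mod_cast (Int.natCast_div s.length 2).symm
  rw [hdiveq, PySem.Chars.slice_eq_listSlice, PySem.List.slice_to s (by positivity), Int.toNat_natCast]
  have hmod : ((s.length : ℤ) % 2 = 0) ↔ s.length % 2 = 0 := by
    constructor
    · intro h; exact_mod_cast h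
    · intro h; exact_mod_cast congrArg (fun x : ℕ => (x : ℤ)) h
  rw [hmod]
  refine and_congr_right fun _ => ?_
  rw [show pvRep (s.take (s.length / 2)) 2 = s.take (s.length / 2) ++ (s.take (s.length / 2) ++ []) from rfl,
    List.append_nil]
  exact eq_comm


-- ===== VERDICT (by name: the statement is the Claim_ definition above) =====
theorem is_valid_id_py_spec : Claim_equal_is_valid_id_py := by
  intro pid mode _
  unfold Spec_is_valid_id_py is_valid_id_py is_valid_id_py_alt
  have hs : PySem.Int.toChars pid ≠ [] := pvToChars_ne_nil pid
  set s := PySem.Int.toChars pid with hsdef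
  simp only []
  cases mode with
  | true =>
    rw [if_pos rfl, if_pos rfl, Bool.eq_iff_iff, pvA_true_iff s hs, pvB_true_iff s hs,
      pvPeriod_iff s hs]
  | false =>
    rw [if_neg (by simp), if_neg (by simp), Bool.eq_iff_iff, pvALoop_true_iff,
      List.forall_mem_singleton]
    have hbool : ∀ (x y : Bool), ((!(x && y)) = true) ↔ ¬(x = true ∧ y = true) := by decide
    rw [hbool, beq_iff_eq, beq_iff_eq]
    have hhit := pvHit_iff s hs 2 le_rfl
    rw [show ((2 : ℕ) : ℤ) = (2 : ℤ) by norm_num] at hhit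
    exact not_congr (hhit.trans (pvFalse_iff s hs).symm)
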